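-- pv_equiv track=rewrite | github.com/LHNCBC/pymetamaplite | src/nls_strings/__init__.py | eliminate_nos_acros
-- ===== SOURCE A (Python) =====
-- nos_strings = [
--     ", NOS",
--     " - NOS",
--     " NOS",
--     ".NOS",
--     " - (NOS)",
--     " (NOS)",
--     "/NOS",
--     "_NOS",
--     ",NOS",
--     "-NOS",
--     ")NOS"
-- ]
--
-- def eliminate_nos_acros(astring):
--
--     # split_string_backtrack(String,"NOS",Left,Right),
--     charindex = astring.find("NOS")
--     if charindex >= 0:
--         left = astring[0:max(charindex, 0)]
--         right = astring[charindex+3: max(charindex+3, len(astring))]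
--         if ((right != '') and
--             right[0].isalnum()) and ((left != '') and
--                                      left[len(left)-1].isalpha()):
--             charindex = astring.find("NOS", charindex+1)
--             if charindex == -1:
--                 return astring
--
--     for nos_string in nos_strings:
--         charindex = astring.find(nos_string)
--         if charindex >= 0:
--             left2 = astring[0: max(charindex, 0)]
--             right2 = astring[charindex+len(nos_string):max
--                              (charindex+len(nos_string), len(astring))]
--
--             if nos_string == ")NOS":
--                 return eliminate_nos_acros(left2 + ")" + right2)
--             elif nos_string == ".NOS":
--                 return eliminate_nos_acros(left2 + "." + right2)
--             elif (nos_string == " NOS"):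
--                 if right2 != '':
--                     if right2[0].isalnum():
--                         return left2 + " NOS" + eliminate_nos_acros(right2)
--                 if not abgn_form(astring[charindex+1:]):
--                     return eliminate_nos_acros(left2 + right2)
--             elif nos_string == "-NOS":
--                 return eliminate_nos_acros(left2 + right2)
--             else:
--                 return eliminate_nos_acros(left2 + right2)
--     return astring
--
-- abgn_forms = set([
--     "ANB-NOS",
--     "ANB NOS",
--     "C NOS",
--     "CL NOS",
--     # is this right?
--     # C0410315|ENG|s|L0753752|PF|S0970087|Oth.inf.+bone dis-NOS|
--     "NOS AB",
--     "NOS AB:ACNC:PT:SER^DONOR:ORD:AGGL",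
--     "NOS-ABN",
--     "NOS ABN",
--     "NOS-AG",
--     "NOS AG",
--     "NOS ANB",
--     "NOS-ANTIBODY",
--     "NOS ANTIBODY",
--     "NOS-ANTIGEN",
--     "NOS ANTIGEN",
--     "NOS GENE",
--     "NOS NRM",
--     "NOS PROTEIN",
--     "NOS-RELATED ANTIGEN",
--     "NOS RELATED ANTIGEN",
--     "NOS1 GENE PRODUCT",
--     "NOS2 GENE PRODUCT",
--     "NOS3 GENE PRODUCT",
--     "NOS MARGN",
-- ])
--
-- def abgn_form(astr):
--     """
--     Determine if a pattern of the form: "NOS ANTIBODY", "NOS AB", etc.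
--     exists.  if so return true.
--     """
--     return astr in abgn_forms
-- ===== SOURCE B (Python) =====
-- # B: table-driven iterative rewrite --- A's per-pattern branch cascade and its
-- # self-recursion are replaced by a (pattern, keep) table, a helper computing the
-- # next edit action, and a while loop accumulating committed chunks.
--
-- abgn_forms = set([
--     "ANB-NOS",
--     "ANB NOS",
--     "C NOS",
--     "CL NOS",
--     "NOS AB",
--     "NOS AB:ACNC:PT:SER^DONOR:ORD:AGGL",
--     "NOS-ABN",
--     "NOS ABN",
--     "NOS-AG",
--     "NOS AG",
--     "NOS ANB",
--     "NOS-ANTIBODY",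
--     "NOS ANTIBODY",
--     "NOS-ANTIGEN",
--     "NOS ANTIGEN",
--     "NOS GENE",
--     "NOS NRM",
--     "NOS PROTEIN",
--     "NOS-RELATED ANTIGEN",
--     "NOS RELATED ANTIGEN",
--     "NOS1 GENE PRODUCT",
--     "NOS2 GENE PRODUCT",
--     "NOS3 GENE PRODUCT",
--     "NOS MARGN",
-- ])
--
-- # each marker with the number of its leading characters that survive deletion
-- # (")NOS" -> ")", ".NOS" -> "."); -1 marks the special " NOS" rules
-- _patterns = [
--     (", NOS", 0),
--     (" - NOS", 0),
--     (" NOS", -1),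
--     (".NOS", 1),
--     (" - (NOS)", 0),
--     (" (NOS)", 0),
--     ("/NOS", 0),
--     ("_NOS", 0),
--     (",NOS", 0),
--     ("-NOS", 0),
--     (")NOS", 1),
-- ]
--
--
-- def _next_action(cur):
--     """First applicable edit: ('commit', j) keeps cur[:j+4] as final output,
--     ('delete', j, plen, keep) rewrites cur to cur[:j+keep] + cur[j+plen:]."""
--     for pat, keep in _patterns:
--         j = cur.find(pat)
--         if j < 0:
--             continue
--         if keep < 0:  # " NOS"
--             if j + 4 < len(cur) and cur[j + 4].isalnum():
--                 return ("commit", j)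
--             if cur[j + 1:] in abgn_forms:
--                 continue
--             return ("delete", j, 4, 0)
--         return ("delete", j, len(pat), keep)
--     return None
--
--
-- def eliminate_nos_acros(astring):
--     chunks = []
--     cur = astring
--     while True:
--         i = cur.find("NOS")
--         if (0 < i and i + 3 < len(cur) and cur[i - 1].isalpha()
--                 and cur[i + 3].isalnum() and cur.find("NOS", i + 1) < 0):
--             break
--         act = _next_action(cur)
--         if act is None:
--             break
--         if act[0] == "commit":
--             j = act[1]
--             chunks.append(cur[:j + 4])
--             cur = cur[j + 4:]
--         else:
--             _, j, plen, keep = act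
--             cur = cur[:j + keep] + cur[j + plen:]
--     chunks.append(cur)
--     return "".join(chunks)
-- ===== Notes on version B (the rewrite author's own statement) =====
-- stated objective: alternative
-- what changed: A's per-pattern if/elif cascade and self-recursion are replaced by a (pattern, keep-count) table driving a uniform delete step, a helper that computes the next edit action, and a single while loop that accumulates committed chunks and joins them at the end.
import Mathlib
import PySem

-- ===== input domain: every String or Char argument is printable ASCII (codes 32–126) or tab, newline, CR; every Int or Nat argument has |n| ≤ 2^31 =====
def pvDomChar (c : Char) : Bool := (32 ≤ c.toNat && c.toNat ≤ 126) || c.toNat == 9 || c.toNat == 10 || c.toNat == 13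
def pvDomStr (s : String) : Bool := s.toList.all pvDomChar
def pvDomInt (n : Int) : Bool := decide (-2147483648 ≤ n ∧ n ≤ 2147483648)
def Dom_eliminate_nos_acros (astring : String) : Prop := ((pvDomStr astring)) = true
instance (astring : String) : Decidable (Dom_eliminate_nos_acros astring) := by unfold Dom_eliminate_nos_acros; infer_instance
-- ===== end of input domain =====

-- B replaces A's recursive per-pattern branch cascade by a (pattern, keep) table, a
-- next-edit-action helper and one while loop accumulating committed chunks; same value proved.

-- shared module constants
def pvNos : List Char := "NOS".toList

def pvAbgnForms : PySem.Set (List Char) :=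
  PySem.Set.ofList
    ["ANB-NOS".toList, "ANB NOS".toList, "C NOS".toList, "CL NOS".toList,
     "NOS AB".toList, "NOS AB:ACNC:PT:SER^DONOR:ORD:AGGL".toList, "NOS-ABN".toList,
     "NOS ABN".toList, "NOS-AG".toList, "NOS AG".toList, "NOS ANB".toList,
     "NOS-ANTIBODY".toList, "NOS ANTIBODY".toList, "NOS-ANTIGEN".toList,
     "NOS ANTIGEN".toList, "NOS GENE".toList, "NOS NRM".toList, "NOS PROTEIN".toList,
     "NOS-RELATED ANTIGEN".toList, "NOS RELATED ANTIGEN".toList,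
     "NOS1 GENE PRODUCT".toList, "NOS2 GENE PRODUCT".toList,
     "NOS3 GENE PRODUCT".toList, "NOS MARGN".toList]

def abgn_formL (astr : List Char) : Bool := PySem.Set.contains pvAbgnForms astr


-- ===== PORT A =====  (literal recursion of Source A; fuel only makes the recursion total:
-- every recursive call is on a strictly shorter string, so fuel = len+1 is never exhausted)
def pvNosStrings : List (List Char) :=
  [", NOS".toList, " - NOS".toList, " NOS".toList, ".NOS".toList, " - (NOS)".toList,
   " (NOS)".toList, "/NOS".toList, "_NOS".toList, ",NOS".toList, "-NOS".toList, ")NOS".toList]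

def nosGuardA (s : List Char) : Bool :=
  -- charindex = astring.find("NOS"); if charindex >= 0 and … and astring.find("NOS", charindex+1) == -1: return astring
  let ci := PySem.Chars.find s pvNos
  let left := PySem.List.slice s (some 0) (some (max ci 0))
  let right := PySem.List.slice s (some (ci + 3)) (some (max (ci + 3) (PySem.Chars.len s)))
  decide (0 ≤ ci) &&
    ((!right.isEmpty && PySem.Chars.isalnum (PySem.List.pyGetD right 0 ' ')) &&
     (!left.isEmpty && PySem.Chars.isalpha (PySem.List.pyGetD left (PySem.List.len left - 1) ' '))) &&
    (PySem.Chars.findFrom s pvNos (ci + 1) none == -1)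

-- the 'for nos_string in nos_strings' loop of Source A; elim = the recursive call back into eliminate_nos_acros
def scanA (elim : List Char → List Char) : (s : List Char) → List (List Char) → List Char
  | s, [] => s
  | s, ns :: rest =>
    let ci := PySem.Chars.find s ns
    if 0 ≤ ci then
      let left2 := PySem.List.slice s (some 0) (some (max ci 0))
      let right2 := PySem.List.slice s (some (ci + PySem.Chars.len ns))
                      (some (max (ci + PySem.Chars.len ns) (PySem.Chars.len s)))
      if ns = ")NOS".toList then elim (left2 ++ [')'] ++ right2)
      else if ns = ".NOS".toList then elim (left2 ++ ['.'] ++ right2)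
      else if ns = " NOS".toList then
        (if !right2.isEmpty && PySem.Chars.isalnum (PySem.List.pyGetD right2 0 ' ') then
           left2 ++ " NOS".toList ++ elim right2
         else if !(abgn_formL (PySem.List.slice s (some (ci + 1)) none)) then elim (left2 ++ right2)
         else scanA elim s rest)
      else if ns = "-NOS".toList then elim (left2 ++ right2)
      else elim (left2 ++ right2)
    else scanA elim s rest

def elimA : Nat → List Char → List Char
  | 0, s => s
  | fuel + 1, s =>
    if nosGuardA s then s
    else scanA (elimA fuel) s pvNosStrings

def eliminate_nos_acros (astring : String) : String :=
  String.ofList (elimA (astring.toList.length + 1) astring.toList)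

-- ===== PORT B =====  (literal port of Source B: pattern table, _next_action helper, while
-- loop over (chunks, cur); fuel only makes the loop total, as for A)
def pvPatterns : List (List Char × Int) :=
  [(", NOS".toList, 0), (" - NOS".toList, 0), (" NOS".toList, -1), (".NOS".toList, 1),
   (" - (NOS)".toList, 0), (" (NOS)".toList, 0), ("/NOS".toList, 0), ("_NOS".toList, 0),
   (",NOS".toList, 0), ("-NOS".toList, 0), (")NOS".toList, 1)]

-- the two tuple shapes _next_action returns: ('commit', j) | ('delete', j, plen, keep)
inductive PvAct where
  | commit (j : Int)
  | delete (j plen keep : Int)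
deriving DecidableEq, Repr

def nextActionB (cur : List Char) : List (List Char × Int) → Option PvAct
  | [] => none
  | (pat, keep) :: rest =>
    let j := PySem.Chars.find cur pat
    if j < 0 then nextActionB cur rest
    else if keep < 0 then  -- " NOS"
      (if decide (j + 4 < PySem.Chars.len cur) &&
          PySem.Chars.isalnum (PySem.List.pyGetD cur (j + 4) ' ') then
         some (.commit j)
       else if abgn_formL (PySem.List.slice cur (some (j + 1)) none) then nextActionB cur rest
       else some (.delete j 4 0))
    else some (.delete j (PySem.Chars.len pat) keep)

def guardB (cur : List Char) : Bool :=
  let i := PySem.Chars.find cur pvNos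
  decide (0 < i) && decide (i + 3 < PySem.Chars.len cur) &&
    PySem.Chars.isalpha (PySem.List.pyGetD cur (i - 1) ' ') &&
    PySem.Chars.isalnum (PySem.List.pyGetD cur (i + 3) ' ') &&
    decide (PySem.Chars.findFrom cur pvNos (i + 1) none < 0)

def loopB : Nat → List (List Char) → List Char → List Char
  | 0, chunks, cur => (chunks ++ [cur]).flatten
  | fuel + 1, chunks, cur =>
    if guardB cur then (chunks ++ [cur]).flatten
    else
      match nextActionB cur pvPatterns with
      | none => (chunks ++ [cur]).flatten
      | some (.commit j) =>
          loopB fuel (chunks ++ [PySem.List.slice cur none (some (j + 4))])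
            (PySem.List.slice cur (some (j + 4)) none)
      | some (.delete j plen keep) =>
          loopB fuel chunks
            (PySem.List.slice cur none (some (j + keep)) ++
             PySem.List.slice cur (some (j + plen)) none)

def eliminate_nos_acros_alt (astring : String) : String :=
  String.ofList (loopB (astring.toList.length + 1) [] astring.toList)

-- ===== PRECONDITION & SPEC =====
def Spec_eliminate_nos_acros (astring : String) (out : String) : Prop := out = eliminate_nos_acros_alt astring
instance (astring : String) (out : String) : Decidable (Spec_eliminate_nos_acros astring out) := by unfold Spec_eliminate_nos_acros; infer_instance

-- ===== CLAIM (what is proved, stated in full; the proofs are below) =====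
def Claim_equal_eliminate_nos_acros : Prop := ∀ (astring : String), Dom_eliminate_nos_acros astring → Spec_eliminate_nos_acros astring (eliminate_nos_acros astring)

-- ===== LEMMAS AND PROOFS =====
theorem pv_find_bound (s ns : List Char) (h : 0 ≤ PySem.Chars.find s ns) :
    (PySem.Chars.find s ns).toNat + ns.length ≤ s.length := by
  obtain ⟨hpre, -⟩ := PySem.Chars.find_spec (s := s) (sub := ns) h
  have h2 := PySem.Chars.find_le_length (s := s) (sub := ns)
  have h3 := hpre.length_le
  simp only [List.length_drop] at h3
  omega

theorem pv_sliceA_right (s ns : List Char) (h : 0 ≤ PySem.Chars.find s ns) :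
    PySem.List.slice s (some (PySem.Chars.find s ns + (ns.length : Int)))
        (some (max (PySem.Chars.find s ns + (ns.length : Int)) (s.length : Int))) =
      s.drop ((PySem.Chars.find s ns).toNat + ns.length) := by
  have hb := pv_find_bound s ns h
  have hmax : max (PySem.Chars.find s ns + (ns.length : Int)) (s.length : Int) = (s.length : Int) := by
    have := PySem.Chars.find_le_length (s := s) (sub := ns)
    omega
  rw [hmax, PySem.List.slice_toNat s (by omega) (by omega)]
  have ha : (PySem.Chars.find s ns + (ns.length : Int)).toNat = (PySem.Chars.find s ns).toNat + ns.length := by omega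
  rw [ha, List.take_of_length_le (by simp)]


theorem pv_sliceA_left (s ns : List Char) (h : 0 ≤ PySem.Chars.find s ns) :
    PySem.List.slice s (some 0) (some (max (PySem.Chars.find s ns) 0)) =
      s.take (PySem.Chars.find s ns).toNat := by
  rw [max_eq_left h, PySem.List.slice_toNat s (by omega) h]
  simp

-- what B's table must say about each pattern for the step to match A's branch on it
def PatOk : List Char × Int → Prop := fun p =>
  p.1 ≠ [] ∧
    ((p.2 = -1 ∧ p.1 = " NOS".toList) ∨
     (p.2 = 0 ∧ p.1 ≠ " NOS".toList ∧ p.1 ≠ ")NOS".toList ∧ p.1 ≠ ".NOS".toList) ∨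
     (p.2 = 1 ∧ (p.1 = ")NOS".toList ∨ p.1 = ".NOS".toList)))

theorem pvPatterns_ok : ∀ p ∈ pvPatterns, PatOk p := by
  intro p hp
  fin_cases hp <;> exact ⟨by decide, by decide⟩

theorem pvNosStrings_eq : pvNosStrings = pvPatterns.map Prod.fst := by rfl

theorem pv_take_prefix (s ns : List Char) (h : 0 ≤ PySem.Chars.find s ns) (k : Nat)
    (hk : k ≤ ns.length) :
    s.take ((PySem.Chars.find s ns).toNat + k) =
      s.take (PySem.Chars.find s ns).toNat ++ ns.take k := by
  obtain ⟨hpre, -⟩ := PySem.Chars.find_spec (s := s) (sub := ns) h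
  obtain ⟨r, hr⟩ := hpre
  rw [List.take_add, ← hr, List.take_append_of_le_length hk]

theorem pv_findFrom_neg_iff (s : List Char) (k : Nat) (hk : k ≤ s.length) :
    (PySem.Chars.findFrom s pvNos (k : Int) none < 0) ↔
      (PySem.Chars.findFrom s pvNos (k : Int) none = -1) := by
  rw [PySem.Chars.findFrom_natCast s pvNos k hk]
  by_cases hf : PySem.Chars.find (List.drop k s) pvNos = -1
  · rw [if_pos hf]
    simp
  · rw [if_neg hf]
    have h0 : 0 ≤ PySem.Chars.find (List.drop k s) pvNos := by
      have := PySem.Chars.neg_one_le_find (s := List.drop k s) (sub := pvNos)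
      omega
    constructor <;> intro h <;> omega

theorem guard_eq (s : List Char) : nosGuardA s = guardB s := by
  unfold nosGuardA guardB
  by_cases hc : 0 ≤ PySem.Chars.find s pvNos
  · have h3 : (3 : Int) = (pvNos.length : Int) := by decide
    have hb := pv_find_bound s pvNos hc
    rw [h3]
    simp only [PySem.Chars.len_eq, pv_sliceA_left s pvNos hc, pv_sliceA_right s pvNos hc]
    set i := PySem.Chars.find s pvNos with hi
    by_cases hlt : i.toNat + pvNos.length < s.length
    · by_cases hpos : (0 : Int) < i
      · -- all structural atoms hold; compare contentwise
        have e2 : (s.drop (i.toNat + pvNos.length)).isEmpty = false := by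
          rw [List.isEmpty_eq_false_iff]
          intro hnil
          have := congrArg List.length hnil
          simp only [List.length_drop, List.length_nil] at this
          omega
        have e2' : decide (i + (pvNos.length : Int) < (s.length : Int)) = true := by
          simp only [decide_eq_true_eq]; omega
        have e1 : decide ((0:Int) ≤ i) = true := by simp [hc]
        have e1' : decide ((0:Int) < i) = true := by simp [hpos]
        have e3 : (s.take i.toNat).isEmpty = false := by
          rw [List.isEmpty_eq_false_iff]
          intro hnil
          have := congrArg List.length hnil
          simp only [List.length_take, List.length_nil] at this
          omega
        have e4 : PySem.List.pyGetD (s.drop (i.toNat + pvNos.length)) 0 ' ' =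
            PySem.List.pyGetD s (i + (pvNos.length : Int)) ' ' := by
          have hx : i + (pvNos.length : Int) = ((i.toNat + pvNos.length : Nat) : Int) := by omega
          rw [PySem.List.pyGetD_zero, hx, PySem.List.pyGetD_natCast,
            List.getD_eq_getElem _ _ (by simp only [List.length_drop]; omega),
            List.getD_eq_getElem _ _ (by omega)]
          simp [List.getElem_drop]
        have e5 : PySem.List.pyGetD (s.take i.toNat) ((PySem.List.len (s.take i.toNat)) - 1) ' ' =
            PySem.List.pyGetD s (i - 1) ' ' := by
          rw [PySem.List.len_eq]
          have hlen : (s.take i.toNat).length = i.toNat := by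
            simp only [List.length_take]
            omega
          rw [hlen]
          have hcast : (i.toNat : Int) - 1 = ((i.toNat - 1 : Nat) : Int) := by omega
          have hcast2 : i - 1 = ((i.toNat - 1 : Nat) : Int) := by omega
          rw [hcast, hcast2, PySem.List.pyGetD_natCast, PySem.List.pyGetD_natCast,
            List.getD_eq_getElem _ _ (by simp only [List.length_take]; omega),
            List.getD_eq_getElem _ _ (by omega)]
          simp [List.getElem_take]
        have e6 : (PySem.Chars.findFrom s pvNos (i + 1) none == -1) =
            decide (PySem.Chars.findFrom s pvNos (i + 1) none < 0) := by
          have hcast : i + 1 = ((i.toNat + 1 : Nat) : Int) := by omega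
          rw [Bool.eq_iff_iff, beq_iff_eq, decide_eq_true_eq, hcast,
            pv_findFrom_neg_iff s (i.toNat + 1) (by omega)]
        simp only [e1, e1', e2, e3, e4, e5, e6, Bool.not_false, Bool.true_and]
        rw [Bool.eq_iff_iff]
        simp only [Bool.and_eq_true]
        tauto
      · have hi0 : i = 0 := by omega
        have e3 : (s.take i.toNat).isEmpty = true := by
          simp [hi0]
        have e1' : decide ((0:Int) < i) = false := by simp [hi0]
        simp only [e3, e1']
        simp
    · have e2 : (s.drop (i.toNat + pvNos.length)).isEmpty = true := by
        rw [List.isEmpty_iff]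
        exact List.drop_eq_nil_of_le (by omega)
      simp only [e2]
      simp only [Bool.not_true, Bool.false_and, Bool.and_false]
      rw [Bool.eq_iff_iff]
      constructor
      · intro h
        exact absurd h (by simp)
      · intro h
        exfalso
        simp only [Bool.and_eq_true, decide_eq_true_eq] at h
        omega
  · have h1 : ¬ (0 : Int) < PySem.Chars.find s pvNos := by omega
    simp [hc, h1]

-- one pass of A's for loop, read off B's computed action
theorem act_rel (elim : List Char → List Char) (s : List Char) :
    ∀ (l : List (List Char × Int)), (∀ p ∈ l, PatOk p) →
      scanA elim s (l.map Prod.fst) =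
        (match nextActionB s l with
         | none => s
         | some (.commit j) =>
             PySem.List.slice s none (some (j + 4)) ++
               elim (PySem.List.slice s (some (j + 4)) none)
         | some (.delete j plen keep) =>
             elim (PySem.List.slice s none (some (j + keep)) ++
               PySem.List.slice s (some (j + plen)) none)) := by
  intro l
  induction l with
  | nil => intro _; rfl
  | cons p rest ih =>
    intro hok
    obtain ⟨ns, keep⟩ := p
    have hPat := hok _ List.mem_cons_self
    simp only [PatOk] at hPat
    obtain ⟨hne, hcases⟩ := hPat
    have hrest := fun q hq => hok q (List.mem_cons_of_mem _ hq)
    simp only [List.map_cons]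
    rw [scanA, nextActionB]
    by_cases hc : 0 ≤ PySem.Chars.find s ns
    · rw [if_pos hc, if_neg (by omega : ¬ PySem.Chars.find s ns < 0)]
      have hb := pv_find_bound s ns hc
      rcases hcases with ⟨hk, hns⟩ | ⟨hk, hn1, hn2, hn3⟩ | ⟨hk, hns⟩
      · -- " NOS", keep = -1
        subst hns
        subst hk
        rw [if_neg (by decide), if_neg (by decide), if_pos rfl,
          if_pos (by decide : (-1 : Int) < 0)]
        have hlen4 : " NOS".toList.length = 4 := by decide
        rw [hlen4] at hb
        rw [PySem.Chars.len_eq s, PySem.Chars.len_eq " NOS".toList,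
          pv_sliceA_right s " NOS".toList hc, pv_sliceA_left s " NOS".toList hc, hlen4]
        have htake := pv_take_prefix s " NOS".toList hc 4 (by decide)
        generalize hgen : PySem.Chars.find s " NOS".toList = j at hc hb htake ⊢
        by_cases halnum : (decide (j + 4 < ((s.length : Nat) : Int)) &&
            PySem.Chars.isalnum (PySem.List.pyGetD s (j + 4) ' ')) = true
        · have hrw : (!(s.drop (j.toNat + 4)).isEmpty &&
              PySem.Chars.isalnum (PySem.List.pyGetD (s.drop (j.toNat + 4)) 0 ' ')) = true := by
            simp only [Bool.and_eq_true, decide_eq_true_eq] at halnum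
            obtain ⟨hlt, hal⟩ := halnum
            simp only [Bool.and_eq_true, Bool.not_eq_eq_eq_not, Bool.not_true,
              List.isEmpty_eq_false_iff]
            constructor
            · intro hnil
              have := congrArg List.length hnil
              simp only [List.length_drop, List.length_nil] at this
              omega
            · have hx : j + 4 = ((j.toNat + 4 : Nat) : Int) := by omega
              rw [hx, PySem.List.pyGetD_natCast] at hal
              rw [PySem.List.pyGetD_zero,
                List.getD_eq_getElem _ _ (by simp only [List.length_drop]; omega)]
              rw [List.getD_eq_getElem _ _ (by omega)] at hal
              simpa [List.getElem_drop] using hal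
          rw [if_pos hrw, if_pos halnum]
          dsimp only
          have hto : PySem.List.slice s none (some (j + 4)) = s.take (j.toNat + 4) := by
            rw [PySem.List.slice_to s (by omega)]
            congr 1
            omega
          have hfrom : PySem.List.slice s (some (j + 4)) none = s.drop (j.toNat + 4) := by
            rw [PySem.List.slice_from s (by omega)]
            congr 1
            omega
          rw [hto, hfrom, htake, (by decide : List.take 4 " NOS".toList = " NOS".toList)]
        · have hrw : (!(s.drop (j.toNat + 4)).isEmpty &&
              PySem.Chars.isalnum (PySem.List.pyGetD (s.drop (j.toNat + 4)) 0 ' ')) = false := by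
            rw [Bool.eq_false_iff]
            intro habs
            apply halnum
            simp only [Bool.and_eq_true, Bool.not_eq_eq_eq_not, Bool.not_true,
              List.isEmpty_eq_false_iff] at habs
            obtain ⟨hnil, hal⟩ := habs
            have hlt : j.toNat + 4 < s.length := by
              rcases Nat.lt_or_ge (j.toNat + 4) s.length with h | h
              · exact h
              · exact absurd (List.drop_eq_nil_of_le (by omega)) hnil
            simp only [Bool.and_eq_true, decide_eq_true_eq]
            refine ⟨by omega, ?_⟩
            rw [PySem.List.pyGetD_zero,
              List.getD_eq_getElem _ _ (by simp only [List.length_drop]; omega)] at hal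
            have hx : j + 4 = ((j.toNat + 4 : Nat) : Int) := by omega
            rw [hx, PySem.List.pyGetD_natCast,
              List.getD_eq_getElem _ _ (by omega)]
            simpa [List.getElem_drop] using hal
          rw [hrw, if_neg (by simp : ¬ ((false : Bool) = true)), if_neg halnum]
          by_cases habgn : abgn_formL (PySem.List.slice s (some (j + 1)) none) = true
          · rw [if_pos habgn, if_neg (by simp [habgn]), ih hrest]
          · rw [if_neg habgn, if_pos (by simp [habgn])]
            dsimp only
            have hto : PySem.List.slice s none (some (j + 0)) = s.take j.toNat := by
              rw [PySem.List.slice_to s (by omega)]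
              congr 1
              omega
            have hfrom : PySem.List.slice s (some (j + 4)) none = s.drop (j.toNat + 4) := by
              rw [PySem.List.slice_from s (by omega)]
              congr 1
              omega
            rw [hto, hfrom]
      · -- plain deletion, keep = 0
        subst hk
        rw [if_neg hn2, if_neg hn3, if_neg hn1,
          if_neg (by decide : ¬ (0 : Int) < 0)]
        dsimp only
        rw [PySem.Chars.len_eq s, PySem.Chars.len_eq ns,
          pv_sliceA_right s ns hc, pv_sliceA_left s ns hc]
        generalize hgen : PySem.Chars.find s ns = j at hc hb ⊢
        have hto : PySem.List.slice s none (some (j + 0)) = s.take j.toNat := by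
          rw [PySem.List.slice_to s (by omega)]
          congr 1
          omega
        have hfrom : PySem.List.slice s (some (j + (ns.length : Int))) none =
            s.drop (j.toNat + ns.length) := by
          rw [PySem.List.slice_from s (by omega)]
          congr 1
          omega
        rw [hto, hfrom]
        by_cases h4 : ns = "-NOS".toList
        · rw [if_pos h4]
        · rw [if_neg h4]
      · -- ")NOS" / ".NOS", keep = 1
        subst hk
        have hlen : ns.length = 4 := by rcases hns with h | h <;> rw [h] <;> decide
        rw [if_neg (by decide : ¬ (1 : Int) < 0)]
        dsimp only
        rw [PySem.Chars.len_eq s, PySem.Chars.len_eq ns,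
          pv_sliceA_right s ns hc, pv_sliceA_left s ns hc]
        have htake1 := pv_take_prefix s ns hc 1 (by omega)
        generalize hgen : PySem.Chars.find s ns = j at hc hb htake1 ⊢
        have hto : PySem.List.slice s none (some (j + 1)) = s.take (j.toNat + 1) := by
          rw [PySem.List.slice_to s (by omega)]
          congr 1
          omega
        have hfrom : PySem.List.slice s (some (j + (ns.length : Int))) none =
            s.drop (j.toNat + ns.length) := by
          rw [PySem.List.slice_from s (by omega)]
          congr 1
          omega
        rw [hto, hfrom]
        rcases hns with h | h
        · subst h
          rw [if_pos rfl, htake1]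
          rfl
        · subst h
          rw [if_neg (by decide), if_pos rfl, htake1]
          rfl
    · rw [if_neg hc, if_pos (by omega : PySem.Chars.find s ns < 0)]
      exact ih hrest

-- every action B takes shortens cur
theorem act_shrink (s : List Char) :
    ∀ (l : List (List Char × Int)), (∀ p ∈ l, PatOk p) →
      ∀ act, nextActionB s l = some act →
        (match act with
         | .commit j => (PySem.List.slice s (some (j + 4)) none).length < s.length
         | .delete j plen keep =>
             (PySem.List.slice s none (some (j + keep)) ++
               PySem.List.slice s (some (j + plen)) none).length < s.length) := by
  intro l
  induction l with
  | nil => intro _ act h; simp [nextActionB] at h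
  | cons p rest ih =>
    intro hok act h
    obtain ⟨ns, keep⟩ := p
    have hPat := hok _ List.mem_cons_self
    simp only [PatOk] at hPat
    obtain ⟨hne, hcases⟩ := hPat
    have hrest := fun q hq => hok q (List.mem_cons_of_mem _ hq)
    rw [nextActionB] at h
    by_cases hc : PySem.Chars.find s ns < 0
    · rw [if_pos hc] at h
      exact ih hrest act h
    · rw [if_neg hc] at h
      have hc' : 0 ≤ PySem.Chars.find s ns := by omega
      have hb := pv_find_bound s ns hc'
      set j := PySem.Chars.find s ns with hj
      have hlpos : 1 ≤ ns.length := List.length_pos_iff.mpr hne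
      rcases hcases with ⟨hk, hns⟩ | ⟨hk, -⟩ | ⟨hk, hns⟩
      · subst hk
        rw [if_pos (by decide : (-1 : Int) < 0)] at h
        have hlen4 : ns.length = 4 := by rw [hns]; decide
        split_ifs at h with h1 h2
        · cases h
          dsimp only
          rw [PySem.List.slice_from s (by omega)]
          simp only [List.length_drop]
          omega
        · exact ih hrest act h
        · cases h
          dsimp only
          rw [PySem.List.slice_to s (by omega), PySem.List.slice_from s (by omega)]
          simp only [List.length_append, List.length_take, List.length_drop]
          omega
      · subst hk
        rw [if_neg (by decide : ¬ (0 : Int) < 0)] at h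
        cases h
        dsimp only
        rw [PySem.Chars.len_eq ns, PySem.List.slice_to s (by omega),
          PySem.List.slice_from s (by omega)]
        simp only [List.length_append, List.length_take, List.length_drop]
        omega
      · subst hk
        rw [if_neg (by decide : ¬ (1 : Int) < 0)] at h
        cases h
        have hlen4 : ns.length = 4 := by rcases hns with h | h <;> rw [h] <;> decide
        dsimp only
        rw [PySem.Chars.len_eq ns, PySem.List.slice_to s (by omega),
          PySem.List.slice_from s (by omega)]
        simp only [List.length_append, List.length_take, List.length_drop]
        omega

-- the while loop, run to the end, is A's recursion after the committed chunks
theorem loopB_eq (fuel : Nat) :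
    ∀ cur : List Char, cur.length < fuel →
      ∀ chunks, loopB fuel chunks cur = chunks.flatten ++ elimA fuel cur := by
  induction fuel with
  | zero => intro c h; omega
  | succ n ih =>
    intro cur hlen chunks
    rw [loopB, elimA, ← guard_eq]
    by_cases hg : nosGuardA cur
    · rw [if_pos hg, if_pos hg]
      simp
    · rw [if_neg hg, if_neg hg, pvNosStrings_eq,
        act_rel (elimA n) cur pvPatterns pvPatterns_ok]
      rcases hact : nextActionB cur pvPatterns with - | act
      · simp
      · have hsh := act_shrink cur pvPatterns pvPatterns_ok act hact
        cases act with
        | commit j =>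
          dsimp only at hsh ⊢
          rw [ih _ (by omega) _]
          simp [List.append_assoc]
        | delete j plen keep =>
          dsimp only at hsh ⊢
          rw [ih _ (by omega) chunks]

-- ===== VERDICT (by name: the statement is the Claim_ definition above) =====
theorem eliminate_nos_acros_spec : Claim_equal_eliminate_nos_acros := by
  intro astring _
  unfold Spec_eliminate_nos_acros eliminate_nos_acros eliminate_nos_acros_alt
  rw [loopB_eq (astring.toList.length + 1) astring.toList (Nat.lt_succ_self _) [],
    List.flatten_nil, List.nil_append]
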